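-- pv_equiv track=rewrite | github.com/CodingDog67/Dockering-around | test.py | find_pathways
-- ===== SOURCE A (Python) =====
-- def find_pathways(len_array:int, jumps:list[int]):
--     #stop conditions
--     if len_array < 0:
--         return []
--     if len_array == 0:
--             return [[]]
--
--     all_jump_combos = []
--
--     for last_used_jump in jumps:
--         combos = find_pathways(len_array - last_used_jump, jumps)
--         for combo in combos:
--             combo.append(last_used_jump)
--             all_jump_combos.append(combo)
--
--     return all_jump_combos
-- ===== SOURCE B (Python) =====
-- def find_pathways(len_array: int, jumps: list[int]):
--     # Sparse bottom-up DP: enumerate only the sums reachable by jump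
--     # sequences (capped at len_array), then fill a dict row by row in
--     # increasing order of sum.  Same combo order as exhaustive recursion.
--     if len_array < 0:
--         return []
--     if len_array == 0:
--         return [[]]
--     reachable = {0}
--     stack = [0]
--     while stack:
--         s = stack.pop()
--         for j in jumps:
--             t = s + j
--             if t <= len_array and t not in reachable:
--                 reachable.add(t)
--                 stack.append(t)
--     dp = {0: [[]]}
--     for L in sorted(reachable):
--         if L == 0:
--             continue
--         row = []
--         for j in jumps:
--             if L - j in dp:
--                 for combo in dp[L - j]:
--                     row.append(combo + [j])
--         dp[L] = row
--     return dp[len_array] if len_array in dp else []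
-- ===== Notes on version B (the rewrite author's own statement) =====
-- stated objective: alternative
-- what changed: Replaces A's exhaustive top-down recursion (which re-solves each subproblem once per path reaching it) with a sparse bottom-up DP: compute the set of reachable jump-sums up to len_array, then fill a dict row per reachable sum in increasing order; identical output order.
import Mathlib
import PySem

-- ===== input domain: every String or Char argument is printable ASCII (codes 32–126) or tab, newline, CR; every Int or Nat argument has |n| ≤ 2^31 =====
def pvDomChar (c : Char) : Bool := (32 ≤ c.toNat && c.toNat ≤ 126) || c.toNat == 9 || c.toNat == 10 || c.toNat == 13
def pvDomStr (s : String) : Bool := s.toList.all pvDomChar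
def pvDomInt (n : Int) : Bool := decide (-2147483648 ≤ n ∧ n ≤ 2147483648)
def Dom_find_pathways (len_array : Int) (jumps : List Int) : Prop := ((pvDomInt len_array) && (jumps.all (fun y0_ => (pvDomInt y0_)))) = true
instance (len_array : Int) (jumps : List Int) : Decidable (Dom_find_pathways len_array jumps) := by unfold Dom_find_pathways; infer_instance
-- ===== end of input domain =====

-- B replaces A's exhaustive top-down recursion by a sparse bottom-up DP: it first computes the
-- set of sums reachable by jump sequences (capped at len_array) and then fills a dict row by row
-- in increasing sum order; objective: alternative decomposition (a table over reachable sums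
-- instead of a recursion over all paths).
-- A mutates the sublists it receives from recursive calls (combo.append); no sharing is
-- observable by the caller, so the equivalence is about the return value.

-- ===== PORT A =====
-- A's recursion is ported with a fuel parameter; inside Pre_ (all jumps ≥ 1, or len ≤ 0)
-- the recursion depth is at most len_array, so fuel len_array.toNat + 1 never runs out.
def findA : Nat → Int → List Int → List (List Int)
  | 0, _, _ => []
  | fuel+1, L, jumps =>
    if L < 0 then []
    else if L = 0 then [[]]
    else jumps.foldl
      (fun acc j => acc ++ (findA fuel (L - j) jumps).map (fun c => c ++ [j])) []

def find_pathways (len_array : Int) (jumps : List Int) : List (List Int) :=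
  findA (len_array.toNat + 1) len_array jumps

-- ===== PORT B =====
-- The while-loop is ported with a fuel parameter (len_array.toNat + 2 iterations suffice inside
-- Pre_, proved below; outside Pre_ the Python loop may diverge).  Python pops from the end of the
-- stack; the port pops from the head — the discovered SET, and hence B's output, does not depend
-- on the pop order.
def expandB (jumps : List Int) (cap s : Int) (p : List Int × PySem.Set Int) : List Int × PySem.Set Int :=
  jumps.foldl
    (fun (p : List Int × PySem.Set Int) j =>
      if s + j ≤ cap ∧ s + j ∉ p.2 then (p.1 ++ [s + j], PySem.Set.add p.2 (s + j)) else p) p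

def bfsB (jumps : List Int) (cap : Int) : Nat → List Int → PySem.Set Int → PySem.Set Int
  | 0, _, R => R
  | fuel+1, stack, R =>
    match stack with
    | [] => R
    | s :: stack' =>
      let p := expandB jumps cap s (stack', R)
      bfsB jumps cap fuel p.1 p.2

def rowB (jumps : List Int) (dp : PySem.Dict Int (List (List Int))) (L : Int) : List (List Int) :=
  jumps.foldl
    (fun row j =>
      match dp.get? (L - j) with
      | some combos => row ++ combos.map (fun c => c ++ [j])
      | none => row) []

def find_pathways_alt (len_array : Int) (jumps : List Int) : List (List Int) :=
  if len_array < 0 then []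
  else if len_array = 0 then [[]]
  else
    let R := bfsB jumps len_array (len_array.toNat + 2) [0] (PySem.Set.ofList [0])
    let dp := (PySem.List.sorted R (fun x => x) false).foldl
      (fun dp L => if L = 0 then dp else dp.insert L (rowB jumps dp L))
      (PySem.Dict.ofList [(0, [[]])])
    match dp.get? len_array with
    | some v => v
    | none => []

-- ===== PRECONDITION & SPEC =====
-- Pre_ excludes exactly the inputs on which A recurses forever (Python RecursionError):
-- len_array > 0 together with some jump ≤ 0.
def Pre_find_pathways (len_array : Int) (jumps : List Int) : Prop :=
  len_array ≤ 0 ∨ ∀ j ∈ jumps, 1 ≤ j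
instance (len_array : Int) (jumps : List Int) : Decidable (Pre_find_pathways len_array jumps) := by unfold Pre_find_pathways; infer_instance

def pvWitness_find_pathways : Int × List Int := (5, [1, 2])

def Spec_find_pathways (len_array : Int) (jumps : List Int) (out : List (List Int)) : Prop := out = find_pathways_alt len_array jumps
instance (len_array : Int) (jumps : List Int) (out : List (List Int)) : Decidable (Spec_find_pathways len_array jumps out) := by unfold Spec_find_pathways; infer_instance

-- ===== CLAIM (what is proved, stated in full; the proofs are below) =====
def Claim_equal_find_pathways : Prop := ∀ (len_array : Int) (jumps : List Int), Dom_find_pathways len_array jumps → Pre_find_pathways len_array jumps → Spec_find_pathways len_array jumps (find_pathways len_array jumps)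

-- ===== LEMMAS AND PROOFS =====

-- ---------- A-side: characterisation of the recursion ----------

-- With positive jumps, findA is independent of the fuel once the fuel exceeds L.toNat.
lemma findA_fuel (jumps : List Int) (hpos : ∀ j ∈ jumps, 1 ≤ j) :
    ∀ f1 f2 (L : Int), L.toNat < f1 → L.toNat < f2 →
      findA f1 L jumps = findA f2 L jumps := by
  intro f1
  induction f1 with
  | zero => intro f2 L h1 _; omega
  | succ f1 ih =>
    intro f2 L h1 h2
    cases f2 with
    | zero => omega
    | succ f2 =>
      simp only [findA]
      split
      · rfl
      · split
        · rfl
        · refine PySem.List.foldl_congr_mem _ _ _ _ (fun acc j hj => ?_)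
          have hjpos := hpos j hj
          have h : findA f1 (L - j) jumps = findA f2 (L - j) jumps := by
            apply ih; omega; omega
          rw [h]

lemma find_pathways_neg (jumps : List Int) (L : Int) (h : L < 0) :
    find_pathways L jumps = [] := by
  simp [find_pathways, findA, h]

lemma find_pathways_zero (jumps : List Int) :
    find_pathways 0 jumps = [[]] := by
  simp [find_pathways, findA]

lemma find_pathways_pos (jumps : List Int) (hpos : ∀ j ∈ jumps, 1 ≤ j)
    (L : Int) (hL : 1 ≤ L) :
    find_pathways L jumps =
      jumps.foldl (fun acc j => acc ++ (find_pathways (L - j) jumps).map (fun c => c ++ [j])) [] := by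
  conv_lhs => unfold find_pathways
  simp only [findA]
  rw [if_neg (by omega), if_neg (by omega)]
  refine PySem.List.foldl_congr_mem _ _ _ _ (fun acc j hj => ?_)
  have hjpos := hpos j hj
  have h : findA L.toNat (L - j) jumps = findA ((L - j).toNat + 1) (L - j) jumps := by
    apply findA_fuel jumps hpos; omega; omega
  rw [h]; rfl

-- if every subproblem is empty, so is the whole result
lemma find_pathways_nil (jumps : List Int) (hpos : ∀ j ∈ jumps, 1 ≤ j)
    (L : Int) (hL : 1 ≤ L) (h : ∀ j ∈ jumps, find_pathways (L - j) jumps = []) :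
    find_pathways L jumps = [] := by
  rw [find_pathways_pos jumps hpos L hL]
  have h2 : jumps.foldl (fun acc j => acc ++ (find_pathways (L - j) jumps).map (fun c => c ++ [j])) ([] : List (List Int))
      = jumps.foldl (fun acc _ => acc) [] := by
    refine PySem.List.foldl_congr_mem _ _ _ _ (fun acc j hj => ?_)
    rw [h j hj]; simp
  rw [h2]
  induction jumps <;> simp_all

-- sums reachable from 0 by jump sequences
inductive ReachJ (jumps : List Int) : Int → Prop
  | zero : ReachJ jumps 0
  | step {s j : Int} : ReachJ jumps s → j ∈ jumps → ReachJ jumps (s + j)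

lemma reachJ_of_find_ne_nil (jumps : List Int) (hpos : ∀ j ∈ jumps, 1 ≤ j) :
    ∀ (n : Nat) (L : Int), L.toNat ≤ n → find_pathways L jumps ≠ [] → ReachJ jumps L := by
  intro n
  induction n with
  | zero =>
    intro L hn hne
    by_cases hneg : L < 0
    · exact absurd (find_pathways_neg jumps L hneg) hne
    · have : L = 0 := by omega
      subst this; exact ReachJ.zero
  | succ n ih =>
    intro L hn hne
    by_cases hneg : L < 0
    · exact absurd (find_pathways_neg jumps L hneg) hne
    · by_cases hz : L = 0
      · subst hz; exact ReachJ.zero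
      · have hL : 1 ≤ L := by omega
        by_cases hex : ∃ j ∈ jumps, find_pathways (L - j) jumps ≠ []
        · obtain ⟨j, hj, hjne⟩ := hex
          have hjpos := hpos j hj
          have hsub : (L - j).toNat ≤ n := by omega
          have hr := ih (L - j) hsub hjne
          have : L - j + j = L := by omega
          exact this ▸ ReachJ.step hr hj
        · have hall : ∀ j ∈ jumps, find_pathways (L - j) jumps = [] := by
            intro j hj
            by_contra h
            exact hex ⟨j, hj, h⟩
          exact absurd (find_pathways_nil jumps hpos L hL hall) hne

-- ---------- B-side: the BFS closure ----------

-- "s is expanded w.r.t. R": every capped successor of s is already in R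
def ExpandedB (jumps : List Int) (cap : Int) (R : List Int) (s : Int) : Prop :=
  ∀ j ∈ jumps, s + j ≤ cap → s + j ∈ R

lemma length_le_of_nodup_bounded (cap : Int) (hcap : 0 ≤ cap) (R : List Int)
    (hn : R.Nodup) (hb : ∀ x ∈ R, 0 ≤ x ∧ x ≤ cap) :
    R.length ≤ cap.toNat + 1 := by
  have hsub : R.toFinset ⊆ Finset.Icc 0 cap := by
    intro x hx
    rw [List.mem_toFinset] at hx
    have := hb x hx
    simp [Finset.mem_Icc]; omega
  have hcard : R.toFinset.card ≤ (Finset.Icc (0 : Int) cap).card := Finset.card_le_card hsub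
  rw [List.toFinset_card_of_nodup hn] at hcard
  rw [Int.card_Icc] at hcard
  omega

-- one pop: expanding s preserves all invariants and pushes exactly the new elements
lemma expand_step (cap s : Int) (hs : 0 ≤ s) :
    ∀ (l : List Int) (st R : List Int),
      (∀ j ∈ l, 1 ≤ j) → R.Nodup → (∀ x ∈ st, x ∈ R) → (∀ x ∈ R, 0 ≤ x ∧ x ≤ cap) →
      (let q := l.foldl
        (fun (p : List Int × PySem.Set Int) j =>
          if s + j ≤ cap ∧ s + j ∉ p.2 then (p.1 ++ [s + j], PySem.Set.add p.2 (s + j)) else p) (st, R)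
       q.2.Nodup ∧ (∀ x ∈ q.1, x ∈ q.2) ∧ (∀ x ∈ q.2, 0 ≤ x ∧ x ≤ cap) ∧
       (∀ x ∈ R, x ∈ q.2) ∧ (∀ x ∈ q.2, x ∈ R ∨ x ∈ q.1) ∧
       (∀ j ∈ l, s + j ≤ cap → s + j ∈ q.2) ∧ (∀ x ∈ st, x ∈ q.1) ∧
       q.1.length + R.length = st.length + q.2.length) := by
  intro l
  induction l with
  | nil =>
    intro st R _ hnd hstR hbnd
    simp only [List.foldl_nil]
    exact ⟨hnd, hstR, hbnd, fun x hx => hx, fun x hx => Or.inl hx, by simp, fun x hx => hx, by simp⟩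
  | cons j l ih =>
    intro st R hl hnd hstR hbnd
    have hjpos : (1 : Int) ≤ j := hl j (by simp)
    have hl' : ∀ j' ∈ l, (1 : Int) ≤ j' := fun j' hj' => hl j' (by simp [hj'])
    simp only [List.foldl_cons]
    by_cases hc : s + j ≤ cap ∧ s + j ∉ R
    · rw [if_pos hc]
      rw [PySem.Set.add_of_not_mem hc.2]
      have hnd' : (R ++ [s + j]).Nodup := by
        simp [List.nodup_append, hnd]
        intro a ha heq
        exact hc.2 (heq ▸ ha)
      have hstR' : ∀ x ∈ st ++ [s + j], x ∈ R ++ [s + j] := by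
        intro x hx
        rcases List.mem_append.mp hx with h | h
        · exact List.mem_append.mpr (Or.inl (hstR x h))
        · exact List.mem_append.mpr (Or.inr h)
      have hbnd' : ∀ x ∈ R ++ [s + j], 0 ≤ x ∧ x ≤ cap := by
        intro x hx
        rcases List.mem_append.mp hx with h | h
        · exact hbnd x h
        · simp at h; subst h; exact ⟨by omega, hc.1⟩
      obtain ⟨c1, c2, c3, c4, c5, c6, c7, c8⟩ := ih (st ++ [s + j]) (R ++ [s + j]) hl' hnd' hstR' hbnd'
      refine ⟨c1, c2, c3, ?_, ?_, ?_, ?_, ?_⟩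
      · intro x hx; exact c4 x (List.mem_append.mpr (Or.inl hx))
      · intro x hx
        rcases c5 x hx with h | h
        · rcases List.mem_append.mp h with h' | h'
          · exact Or.inl h'
          · simp at h'; subst h'
            exact Or.inr (c7 _ (List.mem_append.mpr (Or.inr (by simp))))
        · exact Or.inr h
      · intro j' hj' hle
        rcases List.mem_cons.mp hj' with h | h
        · subst h; exact c4 _ (List.mem_append.mpr (Or.inr (by simp)))
        · exact c6 j' h hle
      · intro x hx; exact c7 x (List.mem_append.mpr (Or.inl hx))
      · simp only [List.length_append, List.length_cons, List.length_nil] at c8 ⊢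
        omega
    · rw [if_neg hc]
      obtain ⟨c1, c2, c3, c4, c5, c6, c7, c8⟩ := ih st R hl' hnd hstR hbnd
      refine ⟨c1, c2, c3, c4, c5, ?_, c7, c8⟩
      intro j' hj' hle
      rcases List.mem_cons.mp hj' with h | h
      · subst h
        have hmem : s + j' ∈ R := by
          by_contra hmem
          exact hc ⟨hle, hmem⟩
        exact c4 _ hmem
      · exact c6 j' h hle

-- the same statement phrased through the port's helper expandB
lemma expand_spec (jumps : List Int) (cap s : Int) (hs : 0 ≤ s)
    (st R : List Int)
    (hl : ∀ j ∈ jumps, 1 ≤ j) (hnd : R.Nodup) (hstR : ∀ x ∈ st, x ∈ R)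
    (hbnd : ∀ x ∈ R, 0 ≤ x ∧ x ≤ cap) :
    ((expandB jumps cap s (st, R)).2.Nodup ∧
     (∀ x ∈ (expandB jumps cap s (st, R)).1, x ∈ (expandB jumps cap s (st, R)).2) ∧
     (∀ x ∈ (expandB jumps cap s (st, R)).2, 0 ≤ x ∧ x ≤ cap) ∧
     (∀ x ∈ R, x ∈ (expandB jumps cap s (st, R)).2) ∧
     (∀ x ∈ (expandB jumps cap s (st, R)).2, x ∈ R ∨ x ∈ (expandB jumps cap s (st, R)).1) ∧
     (∀ j ∈ jumps, s + j ≤ cap → s + j ∈ (expandB jumps cap s (st, R)).2) ∧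
     (∀ x ∈ st, x ∈ (expandB jumps cap s (st, R)).1) ∧
     (expandB jumps cap s (st, R)).1.length + R.length
        = st.length + (expandB jumps cap s (st, R)).2.length) :=
  expand_step cap s hs jumps st R hl hnd hstR hbnd

-- the fueled BFS returns a superset of R that is closed under capped jumps
lemma bfs_main (jumps : List Int) (cap : Int) (hpos : ∀ j ∈ jumps, 1 ≤ j) (hcap : 0 ≤ cap) :
    ∀ (fuel : Nat) (stack R : List Int),
      R.Nodup → (∀ x ∈ stack, x ∈ R) → (∀ x ∈ R, 0 ≤ x ∧ x ≤ cap) →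
      (∀ x ∈ R, x ∉ stack → ExpandedB jumps cap R x) →
      stack.length + (cap.toNat + 1) < fuel + R.length →
      (let R' := bfsB jumps cap fuel stack R
       (∀ x ∈ R, x ∈ R') ∧ R'.Nodup ∧ (∀ x ∈ R', 0 ≤ x ∧ x ≤ cap) ∧
       (∀ x ∈ R', ExpandedB jumps cap R' x)) := by
  intro fuel
  induction fuel with
  | zero =>
    intro stack R hnd hstR hbnd _ hfuel
    have := length_le_of_nodup_bounded cap hcap R hnd hbnd
    omega
  | succ fuel ih =>
    intro stack R hnd hstR hbnd hexp hfuel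
    match stack with
    | [] =>
      refine ⟨fun x hx => hx, hnd, hbnd, fun x hx => hexp x hx (by simp)⟩
    | s :: stack' =>
      have hs0 : 0 ≤ s := (hbnd s (hstR s (by simp))).1
      obtain ⟨c1, c2, c3, c4, c5, c6, c7, c8⟩ :=
        expand_spec jumps cap s hs0 stack' R hpos hnd
          (fun x hx => hstR x (by simp [hx])) hbnd
      set q := expandB jumps cap s (stack', R) with hq
      have hexp' : ∀ x ∈ q.2, x ∉ q.1 → ExpandedB jumps cap q.2 x := by
        intro x hx hnx
        rcases c5 x hx with hxR | hxq
        · by_cases hxs : x = s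
          · subst hxs; intro j hj hle; exact c6 j hj hle
          · by_cases hxst : x ∈ stack'
            · exact absurd (c7 x hxst) hnx
            · have : x ∉ s :: stack' := by simp [hxs, hxst]
              intro j hj hle
              exact c4 _ (hexp x hxR this j hj hle)
        · exact absurd hxq hnx
      have hfuel' : q.1.length + (cap.toNat + 1) < fuel + q.2.length := by
        simp only [List.length_cons] at hfuel
        omega
      obtain ⟨d1, d2, d3, d4⟩ := ih q.1 q.2 c1 c2 c3 hexp' hfuel'
      have hstep : bfsB jumps cap (fuel + 1) (s :: stack') R = bfsB jumps cap fuel q.1 q.2 := by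
        rw [hq]
        rfl
      refine ⟨?_, ?_, ?_, ?_⟩ <;> rw [hstep]
      · intro x hx; exact d1 x (c4 x hx)
      · exact d2
      · exact d3
      · exact d4

-- every reachable sum ≤ cap lies in a closed superset of {0}
lemma mem_of_reachJ (jumps : List Int) (cap : Int) (hpos : ∀ j ∈ jumps, 1 ≤ j)
    (R' : List Int) (h0 : (0 : Int) ∈ R')
    (hclosed : ∀ x ∈ R', ExpandedB jumps cap R' x) :
    ∀ {y : Int}, ReachJ jumps y → y ≤ cap → y ∈ R' := by
  intro y hy
  induction hy with
  | zero => intro _; exact h0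
  | step hr hj ih =>
    intro hle
    rename_i s j
    have hjpos := hpos j hj
    have hs : s ≤ cap := by omega
    exact hclosed s (ih hs) j hj hle

-- ---------- B-side: the dict-building loop ----------

lemma dp_loop (jumps : List Int) (cap : Int) (hpos : ∀ j ∈ jumps, 1 ≤ j) :
    ∀ (ks : List Int) (dp : PySem.Dict Int (List (List Int))),
      ks.Pairwise (· < ·) →
      (∀ L ∈ ks, 1 ≤ L ∧ L ≤ cap) →
      (∀ x v, dp.get? x = some v → v = find_pathways x jumps) →
      (∀ y : Int, 0 ≤ y → y ≤ cap → y ∉ ks → find_pathways y jumps ≠ [] → (dp.get? y).isSome) →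
      (let dp' := ks.foldl
          (fun dp L => if L = 0 then dp else dp.insert L (rowB jumps dp L)) dp
       (∀ x v, dp'.get? x = some v → v = find_pathways x jumps) ∧
       (∀ x : Int, (dp'.get? x).isSome ↔ ((dp.get? x).isSome ∨ x ∈ ks))) := by
  intro ks
  induction ks with
  | nil =>
    intro dp _ _ hval _
    exact ⟨hval, by simp⟩
  | cons L ks ih =>
    intro dp hsorted hkeys hval hcompl
    have hL1 : 1 ≤ L := (hkeys L (by simp)).1
    have hLcap : L ≤ cap := (hkeys L (by simp)).2
    have hLlt : ∀ L' ∈ ks, L < L' := fun L' h => (List.pairwise_cons.mp hsorted).1 L' h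
    simp only [List.foldl_cons, if_neg (by omega : ¬ L = 0)]
    -- the freshly built row is A's value at L
    have hrow : rowB jumps dp L = find_pathways L jumps := by
      rw [find_pathways_pos jumps hpos L hL1]
      unfold rowB
      refine PySem.List.foldl_congr_mem _ _ _ _ (fun acc j hj => ?_)
      have hjpos := hpos j hj
      cases hget : dp.get? (L - j) with
      | some combos => rw [hval _ _ hget]
      | none =>
        have hnil : find_pathways (L - j) jumps = [] := by
          by_cases hneg : L - j < 0
          · exact find_pathways_neg jumps _ hneg
          · by_contra hne
            have hnotin : L - j ∉ L :: ks := by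
              intro hmem
              rcases List.mem_cons.mp hmem with h | h
              · omega
              · have := hLlt _ h; omega
            have := hcompl (L - j) (by omega) (by omega)
              (fun hmem => hnotin (by simp [hmem])) hne
            rw [hget] at this; simp at this
        rw [hnil]; simp
    set dp1 := dp.insert L (rowB jumps dp L) with hdp1
    have hval1 : ∀ x v, dp1.get? x = some v → v = find_pathways x jumps := by
      intro x v hx
      rw [hdp1, PySem.Dict.get?_insert] at hx
      split at hx
      · rename_i hxL; cases hx; rw [hrow]; rw [hxL]
      · exact hval x v hx
    have hcompl1 : ∀ y : Int, 0 ≤ y → y ≤ cap → y ∉ ks → find_pathways y jumps ≠ [] →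
        (dp1.get? y).isSome := by
      intro y h0 hc hnot hne
      rw [hdp1, PySem.Dict.get?_insert]
      split
      · simp
      · rename_i hyL
        exact hcompl y h0 hc (fun hmem => by
          rcases List.mem_cons.mp hmem with h | h
          · exact hyL h
          · exact hnot h) hne
    obtain ⟨e1, e2⟩ := ih dp1 (List.pairwise_cons.mp hsorted).2
      (fun L' h => hkeys L' (by simp [h])) hval1 hcompl1
    refine ⟨e1, ?_⟩
    intro x
    rw [e2 x, hdp1, PySem.Dict.get?_insert]
    constructor
    · intro h
      rcases h with h | h
      · split at h
        · rename_i hxL; right; simp [hxL]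
        · left; exact h
      · right; simp [h]
    · intro h
      rcases h with h | h
      · left; split
        · simp
        · exact h
      · rcases List.mem_cons.mp h with h' | h'
        · left; rw [if_pos h']; simp
        · right; exact h'

-- ===== VERDICT (by name: the statement is the Claim_ definition above) =====
theorem find_pathways_spec : Claim_equal_find_pathways := by
  intro L jumps _ hpre
  unfold Spec_find_pathways
  by_cases hneg : L < 0
  · rw [find_pathways_neg jumps L hneg]
    simp [find_pathways_alt, hneg]
  · by_cases hz : L = 0
    · subst hz
      rw [find_pathways_zero]
      simp [find_pathways_alt]
    · have hL1 : 1 ≤ L := by omega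
      have hpos : ∀ j ∈ jumps, 1 ≤ j := by
        rcases hpre with h | h
        · omega
        · exact h
      -- the BFS result
      have hof : PySem.Set.ofList [(0 : Int)] = [0] := rfl
      obtain ⟨b1, b2, b3, b4⟩ := bfs_main jumps L hpos (by omega)
        (L.toNat + 2) [0] (PySem.Set.ofList [0])
        (by rw [hof]; exact List.nodup_singleton 0)
        (by intro x hx; rw [hof]; exact hx)
        (by intro x hx; rw [hof] at hx; simp at hx; omega)
        (by intro x hx hnx; rw [hof] at hx; simp at hx; simp [hx] at hnx)
        (by rw [hof]; simp; omega)
      set R' := bfsB jumps L (L.toNat + 2) [0] (PySem.Set.ofList [0]) with hR'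
      have h0R' : (0 : Int) ∈ R' := b1 0 (by rw [hof]; simp)
      have hRreach : ∀ {y : Int}, ReachJ jumps y → y ≤ L → y ∈ R' :=
        fun hy hle => mem_of_reachJ jumps L hpos R' h0R' b4 hy hle
      -- the sorted key list
      set ks := PySem.List.sorted R' (fun x => x) false with hks
      have hperm : ks.Perm R' := PySem.List.sorted_perm R' (fun x => x) false
      have hmemks : ∀ x : Int, x ∈ ks ↔ x ∈ R' := fun x => hperm.mem_iff
      have hndR' : R'.Nodup := b2
      have hndks : ks.Nodup := hperm.nodup_iff.mpr hndR'
      have hple : ks.Pairwise (· ≤ ·) := by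
        have h := PySem.List.sorted_pairwise R' (fun x => x)
        simpa using h
      have hplt : ks.Pairwise (· < ·) := by
        have h := List.Pairwise.and hple (List.Pairwise.imp (fun hne => hne) hndks)
        exact h.imp (fun ⟨hle, hne⟩ => lt_of_le_of_ne hle hne)
      -- ks starts with 0
      obtain ⟨t, hkst⟩ : ∃ t, ks = 0 :: t := by
        cases hcase : ks with
        | nil =>
          exfalso
          have : (0 : Int) ∈ ks := (hmemks 0).mpr h0R'
          rw [hcase] at this; simp at this
        | cons k0 t =>
          have hk0mem : k0 ∈ R' := (hmemks k0).mp (by simp [hcase])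
          have hk00 : 0 ≤ k0 := (b3 k0 hk0mem).1
          have hle0 : k0 ≤ 0 := by
            have h2 := PySem.List.key_head_sorted_le R' (fun x => x) (hks.symm.trans hcase) 0 h0R'
            simpa using h2
          have hk0z : k0 = 0 := by omega
          exact ⟨t, by subst hk0z; simp⟩
      -- facts about the tail t of the key list
      have htlt : t.Pairwise (· < ·) := by
        rw [hkst] at hplt; exact (List.pairwise_cons.mp hplt).2
      have ht0lt : ∀ M ∈ t, (0 : Int) < M := by
        rw [hkst] at hplt; exact fun M hM => (List.pairwise_cons.mp hplt).1 M hM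
      have htkeys : ∀ M ∈ t, 1 ≤ M ∧ M ≤ L := by
        intro M hM
        have hmem : M ∈ R' := (hmemks M).mp (by rw [hkst]; simp [hM])
        have hb := b3 M hmem
        exact ⟨by have := ht0lt M hM; omega, hb.2⟩
      -- the initial dict {0: [[]]}
      have hd0get : ∀ x : Int, (PySem.Dict.ofList [((0 : Int), ([[]] : List (List Int)))]).get? x
          = if (0 : Int) = x then some [[]] else none := by
        intro x
        by_cases h0x : (0 : Int) = x
        · subst h0x; rfl
        · rw [if_neg h0x]
          have : ((0 : Int) == x) = false := by simpa using h0x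
          simp [PySem.Dict.ofList, PySem.Dict.update, PySem.Dict.insert, PySem.Dict.get?,
            PySem.Dict.empty, this]
      have hval0 : ∀ x v, (PySem.Dict.ofList [((0 : Int), ([[]] : List (List Int)))]).get? x = some v →
          v = find_pathways x jumps := by
        intro x v hx
        rw [hd0get] at hx
        split at hx
        · rename_i h0x
          cases hx
          rw [← h0x, find_pathways_zero]
        · cases hx
      have hcompl0 : ∀ y : Int, 0 ≤ y → y ≤ L → y ∉ t → find_pathways y jumps ≠ [] →
          ((PySem.Dict.ofList [((0 : Int), ([[]] : List (List Int)))]).get? y).isSome := by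
        intro y h0 hc hnot hne
        have hreach := reachJ_of_find_ne_nil jumps hpos y.toNat y (by omega) hne
        have hyR : y ∈ R' := hRreach hreach hc
        have hyk : y ∈ ks := (hmemks y).mpr hyR
        rw [hkst] at hyk
        rcases List.mem_cons.mp hyk with h | h
        · rw [hd0get, if_pos h.symm]; simp
        · exact absurd h hnot
      obtain ⟨e1, e2⟩ := dp_loop jumps L hpos t (PySem.Dict.ofList [(0, [[]])])
        htlt htkeys hval0 hcompl0
      -- B's value in terms of the dict fold over t
      have halt : find_pathways_alt L jumps =
          (match (t.foldl (fun dp L => if L = 0 then dp else dp.insert L (rowB jumps dp L))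
              (PySem.Dict.ofList [(0, [[]])])).get? L with
           | some v => v
           | none => []) := by
        have hks0 : find_pathways_alt L jumps =
            (match (ks.foldl (fun dp L => if L = 0 then dp else dp.insert L (rowB jumps dp L))
                (PySem.Dict.ofList [(0, [[]])])).get? L with
             | some v => v
             | none => []) := by
          rw [hks, hR']
          unfold find_pathways_alt
          rw [if_neg (by omega), if_neg hz]
        rw [hks0, hkst]
        simp
      rw [halt]
      cases hget : (t.foldl (fun dp L => if L = 0 then dp else dp.insert L (rowB jumps dp L))
          (PySem.Dict.ofList [(0, [[]])])).get? L with
      | some v =>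
        simp only []
        exact (e1 L v hget).symm
      | none =>
        simp only []
        have hnone : ¬ (((PySem.Dict.ofList [((0 : Int), ([[]] : List (List Int)))]).get? L).isSome ∨ L ∈ t) := by
          rw [← e2 L, hget]; simp
        rw [not_or] at hnone
        by_contra hne
        have hreach := reachJ_of_find_ne_nil jumps hpos L.toNat L (by omega) hne
        have hLk : L ∈ ks := (hmemks L).mpr (hRreach hreach le_rfl)
        rw [hkst] at hLk
        rcases List.mem_cons.mp hLk with h | h
        · omega
        · exact hnone.2 h
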